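-- pv_equiv track=rewrite | github.com/robynrox/evse-controller | octopus.py | is_off_peak
-- ===== SOURCE A (Python) =====
-- def is_off_peak(dayMinute):
--     # Off-peak periods: 04:00-07:00, 13:00-16:00, 22:00-24:00
--     off_peak_periods = [
--         (4 * 60, 7 * 60),
--         (13 * 60, 16 * 60),
--         (22 * 60, 24 * 60)
--     ]
--     for start, end in off_peak_periods:
--         if start <= dayMinute < end:
--             return True
--     return False
-- ===== SOURCE B (Python) =====
-- OFF_PEAK_HOURS = {4, 5, 6, 13, 14, 15, 22, 23}
--
-- def is_off_peak(dayMinute):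
--     return dayMinute // 60 in OFF_PEAK_HOURS
-- ===== Notes on version B (the rewrite author's own statement) =====
-- stated objective: idiomatic
-- what changed: Replaced the loop over half-open minute intervals with a single floor-division to the hour and a membership test in a precomputed set of off-peak hours.
import Mathlib
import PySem

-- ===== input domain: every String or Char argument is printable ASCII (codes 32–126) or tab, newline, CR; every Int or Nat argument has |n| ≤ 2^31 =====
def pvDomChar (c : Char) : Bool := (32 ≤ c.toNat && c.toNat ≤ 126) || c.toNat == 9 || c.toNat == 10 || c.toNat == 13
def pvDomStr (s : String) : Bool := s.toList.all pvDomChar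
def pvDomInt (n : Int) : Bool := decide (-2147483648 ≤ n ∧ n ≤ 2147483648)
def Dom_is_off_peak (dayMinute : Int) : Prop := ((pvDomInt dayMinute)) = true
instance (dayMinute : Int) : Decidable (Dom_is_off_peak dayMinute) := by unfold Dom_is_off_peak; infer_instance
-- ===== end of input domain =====

-- B replaces A's loop over minute intervals by one floor division to the hour
-- and a membership test in the precomputed off-peak hour set (idiomatic).

-- ===== PORT A =====
-- literal port: loop over the interval list, early-return True on a hit
def is_off_peak (dayMinute : Int) : Bool :=
  let off_peak_periods : List (Int × Int) :=
    [(4 * 60, 7 * 60), (13 * 60, 16 * 60), (22 * 60, 24 * 60)]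
  go dayMinute off_peak_periods
where
  go (dayMinute : Int) : List (Int × Int) → Bool
    | [] => false
    | (s, e) :: rest => if s ≤ dayMinute ∧ dayMinute < e then true else go dayMinute rest

-- ===== PORT B =====
def OFF_PEAK_HOURS : PySem.Set Int := PySem.Set.ofList [4, 5, 6, 13, 14, 15, 22, 23]

def is_off_peak_alt (dayMinute : Int) : Bool :=
  decide (PySem.Int.floordiv dayMinute 60 ∈ OFF_PEAK_HOURS)

-- ===== PRECONDITION & SPEC =====
def Spec_is_off_peak (dayMinute : Int) (out : Bool) : Prop := out = is_off_peak_alt dayMinute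
instance (dayMinute : Int) (out : Bool) : Decidable (Spec_is_off_peak dayMinute out) := by unfold Spec_is_off_peak; infer_instance

-- ===== CLAIM (what is proved, stated in full; the proofs are below) =====
def Claim_equal_is_off_peak : Prop := ∀ (dayMinute : Int), Dom_is_off_peak dayMinute → Spec_is_off_peak dayMinute (is_off_peak dayMinute)

-- ===== LEMMAS AND PROOFS =====

theorem floordiv60_bounds (x : Int) :
    PySem.Int.floordiv x 60 * 60 ≤ x ∧ x < (PySem.Int.floordiv x 60 + 1) * 60 :=
  (PySem.Int.floordiv_eq_iff_of_pos (by norm_num)).mp rfl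

-- ===== VERDICT (by name: the statement is the Claim_ definition above) =====
theorem is_off_peak_spec : Claim_equal_is_off_peak := by
  intro x _
  unfold Spec_is_off_peak is_off_peak is_off_peak.go is_off_peak_alt OFF_PEAK_HOURS
  obtain ⟨h1, h2⟩ := floordiv60_bounds x
  generalize hq : PySem.Int.floordiv x 60 = q at h1 h2
  rw [Bool.eq_iff_iff]
  simp [PySem.Set.ofList, is_off_peak.go]
  omega
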